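-- pv_equiv track=rewrite | github.com/marregui/quest | src/main/python/keywords.py | format_as_java_regex_pattern
-- ===== SOURCE A (Python) =====
-- def format_as_java_regex_pattern(keywords):
--     pattern = "\"\\\\bcrate\\\\b"
--     indent = 0
--     for kw in keywords:
--         pattern = "{}|\\\\b{}\\\\b".format(pattern, kw)
--         indent += len(kw) + 9 # 2x quote + 2x \\b + 1x pipe
--         if indent > 65:
--             indent = 0
--             pattern += "\"\n + \""
--     pattern += "\""
--     return pattern
-- ===== SOURCE B (Python) =====
-- def format_as_java_regex_pattern(keywords):
--     # Phase 1: greedily partition keywords into line groups by running width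
--     # (len(kw)+9 per keyword; break after the keyword that pushes width past 65).
--     groups = [[]]
--     width = 0
--     for kw in keywords:
--         groups[-1].append(kw)
--         width += len(kw) + 9
--         if width > 65:
--             width = 0
--             groups.append([])
--     # Phase 2: render each group; every keyword appears as |\\bkw\\b,
--     # the first line starts with the literal crate piece.
--     def line(g):
--         return "".join("|\\\\b{}\\\\b".format(kw) for kw in g)
--     lines = ["\\\\bcrate\\\\b" + line(groups[0])] + [line(g) for g in groups[1:]]
--     return "\"" + "\"\n + \"".join(lines) + "\""
-- ===== Notes on version B (the rewrite author's own statement) =====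
-- stated objective: faster
-- what changed: A builds the result in one loop that re-formats the growing pattern string every iteration (copying it each time); B first greedily partitions the keywords into line groups (an explicit list of lists), then renders each group and joins everything once, so layout decisions and formatting are separate phases and no quadratic string copying occurs.
import Mathlib
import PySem

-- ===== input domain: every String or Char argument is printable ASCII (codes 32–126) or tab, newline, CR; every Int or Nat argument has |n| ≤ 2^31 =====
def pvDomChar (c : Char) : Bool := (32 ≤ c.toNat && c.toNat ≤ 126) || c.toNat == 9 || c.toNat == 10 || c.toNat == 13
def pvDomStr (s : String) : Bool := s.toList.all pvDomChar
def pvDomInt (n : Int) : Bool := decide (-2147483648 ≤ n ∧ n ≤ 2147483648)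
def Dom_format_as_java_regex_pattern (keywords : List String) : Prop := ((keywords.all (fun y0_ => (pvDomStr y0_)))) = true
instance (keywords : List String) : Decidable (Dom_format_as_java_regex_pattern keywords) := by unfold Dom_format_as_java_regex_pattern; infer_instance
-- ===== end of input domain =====

-- B replaces A's loop that re-copies the growing pattern string each iteration by two phases —
-- greedily partition the keywords into line groups, then render and join once (objective: faster, measured).


-- ===== PORT A =====
-- loop body of A: pattern and indent updated per keyword, line break on overflow
def stepA (st : String × Int) (kw : String) : String × Int :=
  let pattern := st.1 ++ "|\\\\b" ++ kw ++ "\\\\b"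
  let indent := st.2 + PySem.Str.len kw + 9
  if indent > 65 then (pattern ++ "\"\n + \"", 0) else (pattern, indent)

def format_as_java_regex_pattern (keywords : List String) : String :=
  let st := keywords.foldl stepA ("\"\\\\bcrate\\\\b", 0)
  st.1 ++ "\""

-- ===== PORT B =====
-- B phase 1 loop body: (finished groups, current group, running width)
def stepB (st : List (List String) × List String × Int) (kw : String) :
    List (List String) × List String × Int :=
  let cur := st.2.1 ++ [kw]
  let width := st.2.2 + PySem.Str.len kw + 9
  if width > 65 then (st.1 ++ [cur], [], 0) else (st.1, cur, width)

-- "|\\b{kw}\\b"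
def pvPiece (kw : String) : String := "|\\\\b" ++ kw ++ "\\\\b"

-- "".join of the rendered pieces of one group
def pvLine : List String → String
  | [] => ""
  | kw :: g => pvPiece kw ++ pvLine g

-- sep.join(lines)  (port of str.join)
def pvJoin (sep : String) : List String → String
  | [] => ""
  | [x] => x
  | x :: xs => x ++ sep ++ pvJoin sep xs

def format_as_java_regex_pattern_alt (keywords : List String) : String :=
  let st := keywords.foldl stepB ([], [], 0)
  let groups := st.1 ++ [st.2.1]
  let lines := ("\\\\bcrate\\\\b" ++ pvLine (groups.headD [])) :: (groups.tail.map pvLine)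
  "\"" ++ pvJoin "\"\n + \"" lines ++ "\""

-- ===== PRECONDITION & SPEC =====
def Spec_format_as_java_regex_pattern (keywords : List String) (out : String) : Prop := out = format_as_java_regex_pattern_alt keywords
instance (keywords : List String) (out : String) : Decidable (Spec_format_as_java_regex_pattern keywords out) := by unfold Spec_format_as_java_regex_pattern; infer_instance

-- ===== CLAIM (what is proved, stated in full; the proofs are below) =====
def Claim_equal_format_as_java_regex_pattern : Prop := ∀ (keywords : List String), Dom_format_as_java_regex_pattern keywords → Spec_format_as_java_regex_pattern keywords (format_as_java_regex_pattern keywords)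

-- ===== LEMMAS AND PROOFS =====
-- the line list B builds from a nonempty group list
def mkLines : List (List String) → List String
  | [] => []
  | g :: gs => ("\\\\bcrate\\\\b" ++ pvLine g) :: gs.map pvLine

def pvSep : String := "\"\n + \""

lemma pvLine_append (c : List String) (kw : String) :
    pvLine (c ++ [kw]) = pvLine c ++ pvPiece kw := by
  induction c with
  | nil => simp [pvLine, String.append_empty]
  | cons a t ih => simp [pvLine, ih, String.append_assoc]

lemma pvJoin_last_append (sep : String) (l : List String) (x s : String) :
    pvJoin sep (l ++ [x ++ s]) = pvJoin sep (l ++ [x]) ++ s := by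
  induction l with
  | nil => rfl
  | cons a t ih =>
    cases t with
    | nil => simp [pvJoin, String.append_assoc]
    | cons b u =>
      have h1 : pvJoin sep (a :: b :: (u ++ [x ++ s])) =
          a ++ sep ++ pvJoin sep (b :: (u ++ [x ++ s])) := rfl
      have h2 : pvJoin sep (a :: b :: (u ++ [x])) =
          a ++ sep ++ pvJoin sep (b :: (u ++ [x])) := rfl
      simp only [List.cons_append] at ih ⊢
      rw [h1, h2, ih]
      simp [String.append_assoc]

lemma pvJoin_append_empty (sep : String) (l : List String) (x : String) :
    pvJoin sep ((l ++ [x]) ++ [""]) = pvJoin sep (l ++ [x]) ++ sep := by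
  induction l with
  | nil => simp [pvJoin, String.append_empty]
  | cons a t ih =>
    cases t with
    | nil => simp [pvJoin, String.append_empty, String.append_assoc]
    | cons b u =>
      have h1 : pvJoin sep (a :: b :: (u ++ [x] ++ [""])) =
          a ++ sep ++ pvJoin sep (b :: (u ++ [x] ++ [""])) := rfl
      have h2 : pvJoin sep (a :: b :: (u ++ [x])) =
          a ++ sep ++ pvJoin sep (b :: (u ++ [x])) := rfl
      simp only [List.cons_append, List.append_assoc, List.nil_append] at ih h1 h2 ⊢
      rw [h1, h2, ih]
      simp [String.append_assoc]

-- appending kw to the last group appends its piece to the last line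
lemma mkLines_snoc (d : List (List String)) (c : List String) (kw : String) :
    pvJoin pvSep (mkLines (d ++ [c ++ [kw]])) =
      pvJoin pvSep (mkLines (d ++ [c])) ++ pvPiece kw := by
  cases d with
  | nil =>
    simp only [List.nil_append, mkLines]
    rw [pvLine_append]
    have := pvJoin_last_append pvSep [] ("\\\\bcrate\\\\b" ++ pvLine c) (pvPiece kw)
    simpa [String.append_assoc] using this
  | cons g gs =>
    simp only [List.cons_append, mkLines, List.map_append, List.map_cons, List.map_nil]
    rw [pvLine_append]
    exact pvJoin_last_append pvSep (("\\\\bcrate\\\\b" ++ pvLine g) :: gs.map pvLine)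
      (pvLine c) (pvPiece kw)

-- closing a group appends the separator
lemma mkLines_close (d : List (List String)) (c : List String) :
    pvJoin pvSep (mkLines ((d ++ [c]) ++ [[]])) =
      pvJoin pvSep (mkLines (d ++ [c])) ++ pvSep := by
  cases d with
  | nil =>
    simp only [List.nil_append, mkLines, List.map_nil]
    exact pvJoin_append_empty pvSep [] ("\\\\bcrate\\\\b" ++ pvLine c)
  | cons g gs =>
    simp only [List.cons_append, List.append_assoc, mkLines, List.map_append,
      List.map_cons, List.map_nil]
    have := pvJoin_append_empty pvSep (("\\\\bcrate\\\\b" ++ pvLine g) :: gs.map pvLine)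
      (pvLine c)
    simpa using this

-- loop invariant: A's pattern is the quote plus the joined lines of B's groups so far,
-- and the two width counters agree
lemma loop_eq (ks : List String) : ∀ (d : List (List String)) (c : List String) (w : Int)
    (pat : String), pat = "\"" ++ pvJoin pvSep (mkLines (d ++ [c])) →
    (ks.foldl stepA (pat, w)).1 =
        "\"" ++ pvJoin pvSep (mkLines ((ks.foldl stepB (d, c, w)).1 ++
          [(ks.foldl stepB (d, c, w)).2.1])) ∧
      (ks.foldl stepA (pat, w)).2 = (ks.foldl stepB (d, c, w)).2.2 := by
  induction ks with
  | nil => intro d c w pat hpat; exact ⟨hpat, rfl⟩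
  | cons kw ks ih =>
    intro d c w pat hpat
    simp only [List.foldl_cons]
    by_cases h : w + (kw.length : Int) + 9 > 65
    · have hA : stepA (pat, w) kw =
          (pat ++ "|\\\\b" ++ kw ++ "\\\\b" ++ pvSep, 0) := by
        simp [stepA, pvSep, h]
      have hB : stepB (d, c, w) kw = (d ++ [c ++ [kw]], [], 0) := by
        simp [stepB, h]
      rw [hA, hB]
      apply ih
      rw [mkLines_close, mkLines_snoc, hpat]
      simp [pvPiece, String.append_assoc]
    · have hA : stepA (pat, w) kw =
          (pat ++ "|\\\\b" ++ kw ++ "\\\\b", w + PySem.Str.len kw + 9) := by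
        simp [stepA, h]
      have hB : stepB (d, c, w) kw = (d, c ++ [kw], w + PySem.Str.len kw + 9) := by
        simp [stepB, h]
      rw [hA, hB]
      apply ih
      rw [mkLines_snoc, hpat]
      simp [pvPiece, String.append_assoc]

-- B's inline headD/tail rendering equals mkLines on a nonempty group list
lemma lines_eq (d : List (List String)) (c : List String) :
    ("\\\\bcrate\\\\b" ++ pvLine ((d ++ [c]).headD [])) :: ((d ++ [c]).tail.map pvLine) =
      mkLines (d ++ [c]) := by
  cases d <;> rfl

-- ===== VERDICT (by name: the statement is the Claim_ definition above) =====
theorem format_as_java_regex_pattern_spec : Claim_equal_format_as_java_regex_pattern := by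
  intro keywords _
  show (List.foldl stepA ("\"\\\\bcrate\\\\b", 0) keywords).1 ++ "\"" =
    "\"" ++ pvJoin pvSep
      (("\\\\bcrate\\\\b" ++ pvLine (((List.foldl stepB ([], [], 0) keywords).1 ++
          [(List.foldl stepB ([], [], 0) keywords).2.1]).headD [])) ::
        (((List.foldl stepB ([], [], 0) keywords).1 ++
          [(List.foldl stepB ([], [], 0) keywords).2.1]).tail.map pvLine)) ++ "\""
  rw [lines_eq, (loop_eq keywords [] [] 0 "\"\\\\bcrate\\\\b" (by decide)).1]
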